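-- pv_equiv track=rewrite | github.com/hy-567/XL-HQL | word2vec-master/xlhql/utils/utils_hql.py | get_g_wvi_bert_from_sql_i
-- ===== SOURCE A (Python) =====
-- def find_sql_where_op(gt_sql_tokens_part):
--     """
--     gt_sql_tokens_part: Between 'WHERE' and 'AND'(if exists).
--     """
--     # sql_where_op = ['=', 'EQL', '<', 'LT', '>', 'GT']
--     sql_where_op = ['EQL','LT','GT'] # wv sometimes contains =, < or >.
--
--
--     for sql_where_op in sql_where_op:
--         if sql_where_op in gt_sql_tokens_part:
--             found_sql_where_op = sql_where_op
--             break
--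
--     return found_sql_where_op
--
-- def find_sub_list(sl, l):
--     # from stack overflow.
--     results = []
--     sll = len(sl)
--     for ind in (i for i, e in enumerate(l) if e == sl[0]):
--         if l[ind:ind + sll] == sl:
--             results.append((ind, ind + sll - 1))
--
--     return results
--
-- def get_g_wvi_bert_from_sql_i(nlu, nlu_t, wh_to_wp_index, sql_i, sql_t, tokenizer, nlu_wp_t):
--     """
--     Generate SQuAD style start and end index of wv in nlu. Index is for of after WordPiece tokenization.
--
--     Assumption: where_str always presents in the nlu.
--     """
--     g_wvi = []
--     for b, sql_i1 in enumerate(sql_i):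
--         nlu1 = nlu[b]
--         nlu_t1 = nlu_t[b]
--         nlu_wp_t1 = nlu_wp_t[b]
--         sql_t1 = sql_t[b]
--         wh_to_wp_index1 = wh_to_wp_index[b]
--
--         st = sql_t1.index('WHERE') + 1 if 'WHERE' in sql_t1 else len(sql_t1)
--         g_wvi1 = []
--         while st < len(sql_t1):
--             if 'AND' not in sql_t1[st:]:
--                 ed = len(sql_t1)
--             else:
--                 ed = sql_t1[st:].index('AND') + st
--             sql_wop = find_sql_where_op(sql_t1[st:ed])  # sql where operator
--             st_wop = st + sql_t1[st:ed].index(sql_wop)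
--
--             wv_str11_t = sql_t1[st_wop + 1:ed]
--             results = find_sub_list(wv_str11_t, nlu_t1)
--             st_idx, ed_idx = results[0]
--
--             st_wp_idx = wh_to_wp_index1[st_idx]
--             ed_wp_idx = wh_to_wp_index1[ed_idx]
--
--
--             g_wvi11 = [st_wp_idx, ed_wp_idx]
--             g_wvi1.append(g_wvi11)
--             st = ed + 1
--         g_wvi.append(g_wvi1)
--
--     return g_wvi
-- ===== SOURCE B (Python) =====
-- def find_sql_where_op(gt_sql_tokens_part):
--     sql_where_op = ['EQL', 'LT', 'GT']
--     for sql_where_op in sql_where_op: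
--         if sql_where_op in gt_sql_tokens_part:
--             found_sql_where_op = sql_where_op
--             break
--     return found_sql_where_op
--
--
-- def find_first_sub(sl, l):
--     # first index where sl occurs as a contiguous sublist of l (None if absent)
--     for i in range(len(l) - len(sl) + 1):
--         if l[i:i + len(sl)] == sl:
--             return i
--     return None
--
--
-- def get_g_wvi_bert_from_sql_i(nlu, nlu_t, wh_to_wp_index, sql_i, sql_t, tokenizer, nlu_wp_t):
--     g_wvi = []
--     for b in range(len(sql_i)):
--         nlu_t1 = nlu_t[b]
--         wh_to_wp_index1 = wh_to_wp_index[b]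
--         sql_t1 = sql_t[b]
--         tokens = sql_t1[sql_t1.index('WHERE') + 1:] if 'WHERE' in sql_t1 else []
--         # split the post-WHERE tokens into clauses on 'AND' (a trailing empty
--         # segment after a final 'AND' is not a clause)
--         clauses = []
--         cur = []
--         for tok in tokens:
--             if tok == 'AND':
--                 clauses.append(cur)
--                 cur = []
--             else:
--                 cur.append(tok)
--         if cur:
--             clauses.append(cur)
--         g_wvi1 = []
--         for clause in clauses:
--             op = find_sql_where_op(clause)
--             wv = clause[clause.index(op) + 1:]
--             st_idx = find_first_sub(wv, nlu_t1)
--             ed_idx = st_idx + len(wv) - 1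
--             g_wvi1.append([wh_to_wp_index1[st_idx], wh_to_wp_index1[ed_idx]])
--         g_wvi.append(g_wvi1)
--     return g_wvi
-- ===== Notes on version B (the rewrite author's own statement) =====
-- stated objective: simpler
-- what changed: Replaces A's while-loop over absolute token indices (repeated .index('AND') on suffix slices and index arithmetic) by splitting the post-WHERE tokens into clause sublists on 'AND' and mapping each clause relative to itself, with a direct first-occurrence scan instead of collecting all sublist matches and taking results[0].
import Mathlib
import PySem

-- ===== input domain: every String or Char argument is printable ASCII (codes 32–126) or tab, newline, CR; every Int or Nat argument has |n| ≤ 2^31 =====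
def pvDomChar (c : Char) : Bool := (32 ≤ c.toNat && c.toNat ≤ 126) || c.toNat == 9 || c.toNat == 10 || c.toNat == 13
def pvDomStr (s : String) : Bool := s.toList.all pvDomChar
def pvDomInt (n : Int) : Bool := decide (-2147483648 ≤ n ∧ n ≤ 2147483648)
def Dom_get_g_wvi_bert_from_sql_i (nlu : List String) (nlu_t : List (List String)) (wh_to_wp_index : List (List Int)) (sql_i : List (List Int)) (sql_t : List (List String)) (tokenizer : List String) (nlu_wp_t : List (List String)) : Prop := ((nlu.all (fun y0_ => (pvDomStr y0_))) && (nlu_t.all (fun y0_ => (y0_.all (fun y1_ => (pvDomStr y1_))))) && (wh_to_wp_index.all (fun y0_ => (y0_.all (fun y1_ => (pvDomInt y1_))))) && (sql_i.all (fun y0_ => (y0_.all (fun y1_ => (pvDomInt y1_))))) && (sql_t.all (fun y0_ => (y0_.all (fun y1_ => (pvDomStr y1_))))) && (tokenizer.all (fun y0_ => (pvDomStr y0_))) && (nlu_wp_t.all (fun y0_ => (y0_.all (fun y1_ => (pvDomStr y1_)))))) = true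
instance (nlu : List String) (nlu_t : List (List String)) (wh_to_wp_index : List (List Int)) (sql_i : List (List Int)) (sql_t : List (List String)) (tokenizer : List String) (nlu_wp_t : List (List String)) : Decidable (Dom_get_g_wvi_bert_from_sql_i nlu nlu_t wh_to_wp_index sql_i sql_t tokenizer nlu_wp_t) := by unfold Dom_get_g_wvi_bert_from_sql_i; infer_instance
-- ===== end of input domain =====

-- B replaces A's while-loop with absolute-index arithmetic by a split-into-clauses pass and a
-- direct first-occurrence scan (objective: simpler); equal to A on every input where A returns.

-- ===== PORT A =====

-- A's find_sql_where_op: the for-loop with break is the first op contained in the part;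
-- Python raises UnboundLocalError when none is found (none here; excluded by Pre_).
def find_sql_where_op (part : List String) : Option String :=
  ["EQL", "LT", "GT"].find? (fun op => part.contains op)

-- A's find_sub_list. For sl = [] Python raises IndexError (sl[0]) unless l = []; Pre_
-- excludes empty sl at the call site, so the [] branch only has to match Python for l = [].
def find_sub_list (sl l : List String) : List (Int × Int) :=
  match sl with
  | [] => []
  | s0 :: _ =>
    let sll : Int := (sl.length : Int)
    (PySem.List.enumerate l).foldl
      (fun results p =>
        if p.2 = s0 then
          if PySem.List.slice l (some p.1) (some (p.1 + sll)) = sl then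
            results ++ [(p.1, p.1 + sll - 1)]
          else results
        else results) []

-- A's while-loop over st, with a fuel argument only making it total: st grows by at least 1
-- per iteration, so the initial fuel sql_t1.length + 1 is never exhausted before st < len fails.
-- pyGet?/find?-results are defaulted where Python raises (excluded by Pre_).
def pvWhileA (sql_t1 nlu_t1 : List String) (wh1 : List Int) : Nat → Int → List (List Int) → List (List Int)
  | 0, _, acc => acc
  | fuel + 1, st, acc =>
    if st < (sql_t1.length : Int) then
      let tail := PySem.List.slice sql_t1 (some st) none
      let ed : Int := if tail.contains "AND" then (((PySem.List.index? tail "AND").getD 0 : Nat) : Int) + st else (sql_t1.length : Int)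
      let clause := PySem.List.slice sql_t1 (some st) (some ed)
      let sql_wop := (find_sql_where_op clause).getD ""
      let st_wop : Int := st + (((PySem.List.index? clause sql_wop).getD 0 : Nat) : Int)
      let wv := PySem.List.slice sql_t1 (some (st_wop + 1)) (some ed)
      let results := find_sub_list wv nlu_t1
      let r0 := results.head?.getD (0, 0)
      let st_wp := (PySem.List.pyGet? wh1 r0.1).getD 0
      let ed_wp := (PySem.List.pyGet? wh1 r0.2).getD 0
      pvWhileA sql_t1 nlu_t1 wh1 fuel (ed + 1) (acc ++ [[st_wp, ed_wp]])
    else acc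

def get_g_wvi_bert_from_sql_i (nlu : List String) (nlu_t : List (List String)) (wh_to_wp_index : List (List Int)) (sql_i : List (List Int)) (sql_t : List (List String)) (tokenizer : List String) (nlu_wp_t : List (List String)) : List (List (List Int)) :=
  (PySem.List.enumerate sql_i).foldl
    (fun g_wvi p =>
      let b := p.1
      let _nlu1 := (PySem.List.pyGet? nlu b).getD ""            -- nlu[b]: bound but unused
      let nlu_t1 := (PySem.List.pyGet? nlu_t b).getD []
      let _nlu_wp_t1 := (PySem.List.pyGet? nlu_wp_t b).getD []  -- nlu_wp_t[b]: bound but unused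
      let sql_t1 := (PySem.List.pyGet? sql_t b).getD []
      let wh1 := (PySem.List.pyGet? wh_to_wp_index b).getD []
      let st : Int := if sql_t1.contains "WHERE" then (((PySem.List.index? sql_t1 "WHERE").getD 0 : Nat) : Int) + 1 else (sql_t1.length : Int)
      g_wvi ++ [pvWhileA sql_t1 nlu_t1 wh1 (sql_t1.length + 1) st []]) []

-- ===== PORT B =====

-- B's clause split: accumulate tokens, start a new clause at each 'AND', keep a non-empty tail.
def pvSplitClauses (tokens : List String) : List (List String) :=
  let p := tokens.foldl
    (fun (s : List (List String) × List String) tok =>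
      if tok = "AND" then (s.1 ++ [s.2], ([] : List String)) else (s.1, s.2 ++ [tok]))
    ([], [])
  if p.2 = [] then p.1 else p.1 ++ [p.2]

-- B's find_first_sub: first index where sl occurs as a contiguous sublist of l.
def find_first_sub (sl l : List String) : Option Int :=
  (PySem.List.pyRange 0 ((l.length : Int) - (sl.length : Int) + 1) 1).find?
    (fun i => decide (PySem.List.slice l (some i) (some (i + (sl.length : Int))) = sl))

def get_g_wvi_bert_from_sql_i_alt (nlu : List String) (nlu_t : List (List String)) (wh_to_wp_index : List (List Int)) (sql_i : List (List Int)) (sql_t : List (List String)) (tokenizer : List String) (nlu_wp_t : List (List String)) : List (List (List Int)) :=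
  (List.range sql_i.length).map (fun b =>
    let nlu_t1 := nlu_t.getD b []
    let wh1 := wh_to_wp_index.getD b []
    let sql_t1 := sql_t.getD b []
    let tokens := if sql_t1.contains "WHERE" then PySem.List.slice sql_t1 (some ((((PySem.List.index? sql_t1 "WHERE").getD 0 : Nat) : Int) + 1)) none else []
    (pvSplitClauses tokens).map (fun clause =>
      let op := (find_sql_where_op clause).getD ""
      let wv := PySem.List.slice clause (some ((((PySem.List.index? clause op).getD 0 : Nat) : Int) + 1)) none
      let st_idx : Int := (find_first_sub wv nlu_t1).getD 0
      let ed_idx : Int := st_idx + (wv.length : Int) - 1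
      [(PySem.List.pyGet? wh1 st_idx).getD 0, (PySem.List.pyGet? wh1 ed_idx).getD 0]))

-- ===== PRECONDITION & SPEC =====

-- Pre_-level helpers (independent of both port entry points): the post-WHERE token list, its
-- AND-split, the first where-operator of a clause, the where-value, and its first match index.
def preTokens (sql_t1 : List String) : List String :=
  if "WHERE" ∈ sql_t1 then sql_t1.drop (sql_t1.idxOf "WHERE" + 1) else []

def preClauses (tokens : List String) : List (List String) :=
  let p := tokens.foldl
    (fun (s : List (List String) × List String) tok =>
      if tok = "AND" then (s.1 ++ [s.2], ([] : List String)) else (s.1, s.2 ++ [tok]))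
    ([], [])
  if p.2 = [] then p.1 else p.1 ++ [p.2]

def preOp (clause : List String) : Option String :=
  ["EQL", "LT", "GT"].find? (fun op => clause.contains op)

def preWv (clause : List String) : List String :=
  clause.drop (clause.idxOf ((preOp clause).getD "") + 1)

def preFirst (sl l : List String) : Option Nat :=
  (List.range (l.length - sl.length + 1)).find? (fun i => decide ((l.drop i).take sl.length = sl))

-- Pre_ = exactly the inputs on which the Python A returns normally (no exception): every batch
-- index is in range for the five indexed lists, every where-clause has an operator and a
-- non-empty where-value that occurs in nlu_t[b], and the matched span is inside wh_to_wp_index[b].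
def Pre_get_g_wvi_bert_from_sql_i (nlu : List String) (nlu_t : List (List String)) (wh_to_wp_index : List (List Int)) (sql_i : List (List Int)) (sql_t : List (List String)) (tokenizer : List String) (nlu_wp_t : List (List String)) : Prop :=
  ∀ b ∈ List.range sql_i.length,
    b < nlu.length ∧ b < nlu_t.length ∧ b < nlu_wp_t.length ∧ b < sql_t.length ∧ b < wh_to_wp_index.length ∧
    ∀ clause ∈ preClauses (preTokens (sql_t.getD b [])),
      (preOp clause).isSome = true ∧ preWv clause ≠ [] ∧
      (preFirst (preWv clause) (nlu_t.getD b [])).isSome = true ∧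
      (preFirst (preWv clause) (nlu_t.getD b [])).getD 0 + (preWv clause).length ≤ (wh_to_wp_index.getD b []).length

instance (nlu : List String) (nlu_t : List (List String)) (wh_to_wp_index : List (List Int)) (sql_i : List (List Int)) (sql_t : List (List String)) (tokenizer : List String) (nlu_wp_t : List (List String)) : Decidable (Pre_get_g_wvi_bert_from_sql_i nlu nlu_t wh_to_wp_index sql_i sql_t tokenizer nlu_wp_t) := by
  unfold Pre_get_g_wvi_bert_from_sql_i; infer_instance

def pvWitness_get_g_wvi_bert_from_sql_i : List String × List (List String) × List (List Int) × List (List Int) × List (List String) × List String × List (List String) :=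
  (["q"], [["a", "b"]], [[0, 1]], [[0]], [["WHERE", "c", "EQL", "a", "b"]], [], [["a"]])

def Spec_get_g_wvi_bert_from_sql_i (nlu : List String) (nlu_t : List (List String)) (wh_to_wp_index : List (List Int)) (sql_i : List (List Int)) (sql_t : List (List String)) (tokenizer : List String) (nlu_wp_t : List (List String)) (out : List (List (List Int))) : Prop := out = get_g_wvi_bert_from_sql_i_alt nlu nlu_t wh_to_wp_index sql_i sql_t tokenizer nlu_wp_t
instance (nlu : List String) (nlu_t : List (List String)) (wh_to_wp_index : List (List Int)) (sql_i : List (List Int)) (sql_t : List (List String)) (tokenizer : List String) (nlu_wp_t : List (List String)) (out : List (List (List Int))) : Decidable (Spec_get_g_wvi_bert_from_sql_i nlu nlu_t wh_to_wp_index sql_i sql_t tokenizer nlu_wp_t out) := by unfold Spec_get_g_wvi_bert_from_sql_i; infer_instance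

-- ===== CLAIM (what is proved, stated in full; the proofs are below) =====
def Claim_equal_get_g_wvi_bert_from_sql_i : Prop := ∀ (nlu : List String) (nlu_t : List (List String)) (wh_to_wp_index : List (List Int)) (sql_i : List (List Int)) (sql_t : List (List String)) (tokenizer : List String) (nlu_wp_t : List (List String)), Dom_get_g_wvi_bert_from_sql_i nlu nlu_t wh_to_wp_index sql_i sql_t tokenizer nlu_wp_t → Pre_get_g_wvi_bert_from_sql_i nlu nlu_t wh_to_wp_index sql_i sql_t tokenizer nlu_wp_t → Spec_get_g_wvi_bert_from_sql_i nlu nlu_t wh_to_wp_index sql_i sql_t tokenizer nlu_wp_t (get_g_wvi_bert_from_sql_i nlu nlu_t wh_to_wp_index sql_i sql_t tokenizer nlu_wp_t)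

-- ===== LEMMAS AND PROOFS =====

-- Proof-level recursive characterisation of the AND-split, and the two per-clause value
-- functions the ports are reduced to.
def clausesR (tokens : List String) : List (List String) :=
  if h : tokens = [] then []
  else if "AND" ∈ tokens then
    tokens.take (tokens.idxOf "AND") :: clausesR (tokens.drop (tokens.idxOf "AND" + 1))
  else [tokens]
termination_by tokens.length
decreasing_by
  have : tokens.length ≠ 0 := fun hn => h (List.eq_nil_of_length_eq_zero hn)
  simp [List.length_drop]; omega
def fA (nlu_t1 : List String) (wh1 : List Int) (clause : List String) : List Int :=
  let op := (find_sql_where_op clause).getD ""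
  let wv := clause.drop ((PySem.List.index? clause op).getD 0 + 1)
  let r0 := (find_sub_list wv nlu_t1).head?.getD (0, 0)
  [(PySem.List.pyGet? wh1 r0.1).getD 0, (PySem.List.pyGet? wh1 r0.2).getD 0]
def fB (nlu_t1 : List String) (wh1 : List Int) (clause : List String) : List Int :=
  let op := (find_sql_where_op clause).getD ""
  let wv := PySem.List.slice clause (some ((((PySem.List.index? clause op).getD 0 : Nat) : Int) + 1)) none
  let st_idx : Int := (find_first_sub wv nlu_t1).getD 0
  let ed_idx : Int := st_idx + (wv.length : Int) - 1
  [(PySem.List.pyGet? wh1 st_idx).getD 0, (PySem.List.pyGet? wh1 ed_idx).getD 0]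

theorem idxOf?_getD_of_mem {l : List String} {v : String} (h : v ∈ l) :
    (l.idxOf? v).getD 0 = l.idxOf v := by
  induction l with
  | nil => cases h
  | cons x xs ih =>
    by_cases hx : x = v
    · subst hx; simp [List.idxOf?_cons]
    · rcases List.mem_cons.mp h with rfl | hm
      · exact absurd rfl hx
      · have hs : (xs.idxOf? v).isSome := by
          simpa [List.isSome_idxOf?] using hm
        obtain ⟨i, hi⟩ := Option.isSome_iff_exists.mp hs
        have := ih hm
        simp [List.idxOf?_cons, hx, hi] at this ⊢
        omega
theorem clausesR_nil : clausesR [] = [] := by rw [clausesR]; simp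

theorem clausesR_no_and (tokens : List String) (h : tokens ≠ []) (h2 : "AND" ∉ tokens) :
    clausesR tokens = [tokens] := by
  rw [clausesR]; simp [h, h2]

theorem clausesR_and (cur rest : List String) (hcur : "AND" ∉ cur) :
    clausesR (cur ++ "AND" :: rest) = cur :: clausesR rest := by
  rw [clausesR]
  have hne : cur ++ "AND" :: rest ≠ [] := by simp
  have hmem : "AND" ∈ cur ++ "AND" :: rest := by simp
  have hidx : (cur ++ "AND" :: rest).idxOf "AND" = cur.length := by
    rw [List.idxOf_append_of_notMem hcur]; simp
  rw [dif_neg hne, if_pos hmem, hidx]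
  congr 1
  · exact List.take_left
  · congr 1
    rw [show cur.length + 1 = (cur ++ ["AND"]).length by simp]
    rw [show cur ++ "AND" :: rest = (cur ++ ["AND"]) ++ rest by simp]
    exact List.drop_left
theorem split_aux : ∀ (tokens : List String) (clauses : List (List String)) (cur : List String), "AND" ∉ cur →
    (if (tokens.foldl
        (fun (s : List (List String) × List String) tok =>
          if tok = "AND" then (s.1 ++ [s.2], ([] : List String)) else (s.1, s.2 ++ [tok]))
        (clauses, cur)).2 = []
     then (tokens.foldl
        (fun (s : List (List String) × List String) tok =>
          if tok = "AND" then (s.1 ++ [s.2], ([] : List String)) else (s.1, s.2 ++ [tok]))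
        (clauses, cur)).1
     else (tokens.foldl
        (fun (s : List (List String) × List String) tok =>
          if tok = "AND" then (s.1 ++ [s.2], ([] : List String)) else (s.1, s.2 ++ [tok]))
        (clauses, cur)).1 ++ [(tokens.foldl
        (fun (s : List (List String) × List String) tok =>
          if tok = "AND" then (s.1 ++ [s.2], ([] : List String)) else (s.1, s.2 ++ [tok]))
        (clauses, cur)).2]) = clauses ++ clausesR (cur ++ tokens) := by
  intro tokens
  induction tokens with
  | nil =>
    intro clauses cur hcur
    simp only [List.foldl_nil, List.append_nil]
    by_cases hc : cur = []
    · subst hc; simp [clausesR_nil]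
    · simp [hc, clausesR_no_and cur hc hcur]
  | cons tok rest ih =>
    intro clauses cur hcur
    by_cases ht : tok = "AND"
    · subst ht
      rw [List.foldl_cons, if_pos rfl, clausesR_and cur rest hcur]
      have := ih (clauses ++ [cur]) [] (by simp)
      simpa using this
    · have h2 : "AND" ∉ cur ++ [tok] := by
        simp only [List.mem_append, List.mem_singleton]
        rintro (h | h)
        · exact hcur h
        · exact ht h.symm
      rw [List.foldl_cons, if_neg ht]
      have := ih clauses (cur ++ [tok]) h2
      simpa using this

theorem preClauses_eq_clausesR (tokens : List String) : preClauses tokens = clausesR tokens := by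
  have := split_aux tokens [] [] (by simp)
  simpa [preClauses] using this
theorem slice_eq_iff_drop_take (l sl : List String) (j : Int) (hj : 0 ≤ j) (k : Nat) :
    PySem.List.slice l (some j) (some (j + (k : Int))) = sl ↔ (l.drop j.toNat).take k = sl := by
  rw [PySem.List.slice_toNat l hj (by omega)]
  have : (j + (k : Int)).toNat - j.toNat = k := by omega
  rw [this]

theorem find_sub_list_eq (sl l : List String) (hsl : sl ≠ []) :
    find_sub_list sl l
      = ((List.range l.length).filter (fun i => decide ((l.drop i).take sl.length = sl))).map
          (fun (i : Nat) => ((i : Int), (i : Int) + (sl.length : Int) - 1)) := by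
  obtain ⟨s0, t, rfl⟩ : ∃ s0 t, sl = s0 :: t := by
    cases sl with
    | nil => exact absurd rfl hsl
    | cons a b => exact ⟨a, b, rfl⟩
  show ((PySem.List.enumerate l).foldl _ []) = _
  rw [PySem.List.enumerate_eq_map_pyRange l "", List.foldl_map]
  rw [PySem.List.foldl_congr_mem _ _
      (fun results j => if decide ((l.drop j.toNat).take (s0 :: t).length = s0 :: t)
        then results ++ [(j, j + ((s0 :: t).length : Int) - 1)] else results) []
      ?_]
  · rw [PySem.List.foldl_append_if]
    simp only [PySem.List.len_eq, PySem.List.pyRange_zero_nat, List.filter_map, List.map_map,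
      List.nil_append]
    have hp : ((fun j : Int => decide (List.take (s0 :: t).length (List.drop j.toNat l) = s0 :: t)) ∘ (fun k : Nat => (k : Int)))
        = (fun i : Nat => decide (List.take (s0 :: t).length (List.drop i l) = s0 :: t)) := by
      funext i; simp
    have hf : ((fun j : Int => (j, j + (((s0 :: t).length : Nat) : Int) - 1)) ∘ (fun k : Nat => (k : Int)))
        = (fun i : Nat => ((i : Int), (i : Int) + (((s0 :: t).length : Nat) : Int) - 1)) := by
      funext i; simp
    rw [hp, hf]
  · intro acc j hj
    have hjr : 0 ≤ j ∧ j < (l.length : Int) := by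
      simpa using PySem.List.mem_pyRange_one.mp (by simpa using hj)
    by_cases hm : (l.drop j.toNat).take (s0 :: t).length = s0 :: t
    · have hslice : PySem.List.slice l (some j) (some (j + ((s0 :: t).length : Int))) = s0 :: t :=
        (slice_eq_iff_drop_take l (s0 :: t) j hjr.1 _).mpr hm
      have hhead : l[j.toNat]? = some s0 := by
        have := congrArg List.head? hm
        rwa [List.head?_take, if_neg (by simp), List.head?_drop] at this
      have hget : PySem.List.pyGetD l j "" = s0 := by
        rw [PySem.List.pyGetD_eq_getElem l "" hjr.1 hjr.2]
        have hlt : j.toNat < l.length := by omega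
        simpa [List.getElem?_eq_getElem hlt] using hhead
      simp only []
      rw [if_pos hget, if_pos hslice, if_pos (by simpa using hm)]
    · have hslice : ¬ PySem.List.slice l (some j) (some (j + ((s0 :: t).length : Int))) = s0 :: t :=
        fun hc => hm ((slice_eq_iff_drop_take l (s0 :: t) j hjr.1 _).mp hc)
      by_cases hg : PySem.List.pyGetD l j "" = s0
      · simp only []
        rw [if_pos hg, if_neg hslice, if_neg (by simpa using hm)]
      · simp only []
        rw [if_neg hg, if_neg (by simpa using hm)]
theorem match_bound (sl l : List String) (hsl : sl ≠ []) (i : Nat) (h : (l.drop i).take sl.length = sl) :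
    i + sl.length ≤ l.length := by
  have hpos : sl.length ≠ 0 := fun h0 => hsl (List.eq_nil_of_length_eq_zero h0)
  have := congrArg List.length h
  simp only [List.length_take, List.length_drop] at this
  omega

theorem find?_range_eq (sl l : List String) (hsl : sl ≠ []) :
    (List.range l.length).find? (fun i => decide ((l.drop i).take sl.length = sl))
      = preFirst sl l := by
  unfold preFirst
  by_cases hk : sl.length ≤ l.length
  · have hlen : l.length = (l.length - sl.length + 1) + (sl.length - 1) := by
      have : sl.length ≠ 0 := fun h => hsl (List.eq_nil_of_length_eq_zero h)
      omega
    rw [show List.range l.length = List.range ((l.length - sl.length + 1) + (sl.length - 1)) from by rw [← hlen],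
        List.range_add, List.find?_append]
    have h2 : (List.find? (fun i => decide ((l.drop i).take sl.length = sl))
        ((List.range (sl.length - 1)).map (fun x => l.length - sl.length + 1 + x))) = none := by
      rw [List.find?_eq_none]
      intro x hx
      simp only [List.mem_map] at hx
      obtain ⟨y, hy, rfl⟩ := hx
      simp only [decide_eq_true_eq]
      intro hc
      have := match_bound sl l hsl _ hc
      have hy' := List.mem_range.mp hy
      omega
    rw [h2, Option.or_none]
  · have h1 : (List.find? (fun i => decide ((l.drop i).take sl.length = sl)) (List.range l.length)) = none := by
      rw [List.find?_eq_none]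
      intro x _
      simp only [decide_eq_true_eq]
      intro hc
      have := match_bound sl l hsl _ hc
      omega
    have h2 : (List.find? (fun i => decide ((l.drop i).take sl.length = sl)) (List.range (l.length - sl.length + 1))) = none := by
      rw [List.find?_eq_none]
      intro x _
      simp only [decide_eq_true_eq]
      intro hc
      have := match_bound sl l hsl _ hc
      omega
    rw [h1, h2]

theorem head?_find_sub_list (sl l : List String) (hsl : sl ≠ []) :
    (find_sub_list sl l).head?
      = (preFirst sl l).map (fun (i : Nat) => ((i : Int), (i : Int) + (sl.length : Int) - 1)) := by
  rw [find_sub_list_eq sl l hsl, List.head?_map, List.head?_filter, find?_range_eq sl l hsl]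

theorem find_first_sub_eq (sl l : List String) (hsl : sl ≠ []) :
    find_first_sub sl l = (preFirst sl l).map (fun (i : Nat) => (i : Int)) := by
  unfold find_first_sub
  by_cases hk : sl.length ≤ l.length
  · have hb : (l.length : Int) - (sl.length : Int) + 1 = ((l.length - sl.length + 1 : Nat) : Int) := by
      push_cast; omega
    rw [hb, PySem.List.pyRange_zero_nat, List.find?_map]
    have hp : ((fun i : Int => decide (PySem.List.slice l (some i) (some (i + (sl.length : Int))) = sl)) ∘ (fun k : Nat => (k : Int)))
        = fun i : Nat => decide ((l.drop i).take sl.length = sl) := by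
      funext i
      simp only [Function.comp_apply]
      rw [PySem.List.slice_natCast_add]
    rw [hp]
    unfold preFirst
    rfl
  · have hz : ((l.length : Int) - (sl.length : Int) + 1).toNat = 0 := by omega
    rw [PySem.List.pyRange_zero, hz]
    simp only [List.range_zero, List.map_nil, List.find?_nil]
    have h1 : l.length - sl.length + 1 = 1 := by omega
    unfold preFirst
    rw [h1]
    have : List.range 1 = [0] := rfl
    rw [this]
    simp only [List.find?_cons]
    have hne : ¬ (l.take sl.length = sl) := by
      intro hc
      have := match_bound sl l hsl 0 (by simpa using hc)
      omega
    simp [hne]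
theorem fA_eq_fB (nlu_t1 : List String) (wh1 : List Int) (clause : List String)
    (hop : (preOp clause).isSome = true) (hwv : preWv clause ≠ [])
    (hfst : (preFirst (preWv clause) nlu_t1).isSome = true) :
    fA nlu_t1 wh1 clause = fB nlu_t1 wh1 clause := by
  obtain ⟨op, hopeq⟩ := Option.isSome_iff_exists.mp hop
  have hgetop : (find_sql_where_op clause).getD "" = op := by
    show (preOp clause).getD "" = op
    rw [hopeq]; rfl
  have hmem : op ∈ clause := by
    have := List.find?_some (show List.find? (fun o => clause.contains o) ["EQL", "LT", "GT"] = some op from hopeq)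
    simpa using this
  have hjeq : (PySem.List.index? clause ((find_sql_where_op clause).getD "")).getD 0 = clause.idxOf op := by
    rw [hgetop, PySem.List.index?_eq_idxOf?]
    exact idxOf?_getD_of_mem hmem
  have hwveq : clause.drop ((PySem.List.index? clause ((find_sql_where_op clause).getD "")).getD 0 + 1) = preWv clause := by
    rw [hjeq]
    unfold preWv
    rw [show (preOp clause).getD "" = op from by rw [hopeq]; rfl]
  obtain ⟨i, hi⟩ := Option.isSome_iff_exists.mp hfst
  simp only [fA, fB]
  rw [show ((((PySem.List.index? clause ((find_sql_where_op clause).getD "")).getD 0 : Nat) : Int) + 1)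
        = (((PySem.List.index? clause ((find_sql_where_op clause).getD "")).getD 0 + 1 : Nat) : Int) from by push_cast; ring,
      PySem.List.slice_from_natCast, hwveq]
  rw [head?_find_sub_list (preWv clause) nlu_t1 hwv, find_first_sub_eq (preWv clause) nlu_t1 hwv, hi]
  simp
theorem pvWhileA_stop (sql_t1 nlu_t1 : List String) (wh1 : List Int) (fuel : Nat) (st : Int)
    (acc : List (List Int)) (h : ¬ st < (sql_t1.length : Int)) :
    pvWhileA sql_t1 nlu_t1 wh1 fuel st acc = acc := by
  cases fuel <;> simp [pvWhileA, h]

theorem pvWhileA_step (sql_t1 nlu_t1 : List String) (wh1 : List Int) (fuel : Nat) (st : Int)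
    (acc : List (List Int)) (h0 : 0 ≤ st) (hlt : st < (sql_t1.length : Int)) :
    pvWhileA sql_t1 nlu_t1 wh1 (fuel + 1) st acc =
      (if "AND" ∈ sql_t1.drop st.toNat
       then pvWhileA sql_t1 nlu_t1 wh1 fuel
              ((((sql_t1.drop st.toNat).idxOf "AND" : Nat) : Int) + st + 1)
              (acc ++ [fA nlu_t1 wh1 ((sql_t1.drop st.toNat).take ((sql_t1.drop st.toNat).idxOf "AND"))])
       else acc ++ [fA nlu_t1 wh1 (sql_t1.drop st.toNat)]) := by
  simp only [pvWhileA]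
  rw [if_pos hlt]
  have htail : PySem.List.slice sql_t1 (some st) none = sql_t1.drop st.toNat :=
    PySem.List.slice_from sql_t1 h0
  rw [htail]
  have hrlen : (sql_t1.drop st.toNat).length = sql_t1.length - st.toNat := List.length_drop
  by_cases hAND : "AND" ∈ sql_t1.drop st.toNat
  · have hcon : (sql_t1.drop st.toNat).contains "AND" = true := List.elem_eq_true_of_mem hAND
    rw [if_pos hcon, if_pos hAND]
    have hidx? : (PySem.List.index? (sql_t1.drop st.toNat) "AND").getD 0 = (sql_t1.drop st.toNat).idxOf "AND" := by
      rw [PySem.List.index?_eq_idxOf?]; exact idxOf?_getD_of_mem hAND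
    rw [hidx?]
    have hidxlt : (sql_t1.drop st.toNat).idxOf "AND" < (sql_t1.drop st.toNat).length :=
      List.idxOf_lt_length_of_mem hAND
    have hclause : PySem.List.slice sql_t1 (some st)
        (some ((((sql_t1.drop st.toNat).idxOf "AND" : Nat) : Int) + st)) = (sql_t1.drop st.toNat).take ((sql_t1.drop st.toNat).idxOf "AND") := by
      rw [PySem.List.slice_toNat sql_t1 h0 (by omega)]
      congr 1
      omega
    rw [hclause]
    have hwv : ∀ (j : Nat), PySem.List.slice sql_t1 (some (st + (j : Int) + 1))
        (some ((((sql_t1.drop st.toNat).idxOf "AND" : Nat) : Int) + st))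
        = ((sql_t1.drop st.toNat).take ((sql_t1.drop st.toNat).idxOf "AND")).drop (j + 1) := by
      intro j
      rw [PySem.List.slice_toNat sql_t1 (by omega) (by omega), List.drop_take, List.drop_drop]
      congr 1
      · omega
      · congr 1
        omega
    rw [hwv]
    simp only [fA]
  · have hcon : ¬ (sql_t1.drop st.toNat).contains "AND" = true := by
      intro hc
      exact hAND (by simpa using hc)
    rw [if_neg hcon, if_neg hAND]
    have hclause : PySem.List.slice sql_t1 (some st) (some (sql_t1.length : Int)) = sql_t1.drop st.toNat := by
      rw [PySem.List.slice_toNat sql_t1 h0 (by omega)]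
      rw [List.take_of_length_le (by omega)]
    rw [hclause]
    have hwv : ∀ (j : Nat), PySem.List.slice sql_t1 (some (st + (j : Int) + 1)) (some (sql_t1.length : Int))
        = (sql_t1.drop st.toNat).drop (j + 1) := by
      intro j
      rw [PySem.List.slice_toNat sql_t1 (by omega) (by omega),
          show (st + (j : Int) + 1).toNat = st.toNat + (j + 1) by omega, List.drop_drop,
          List.take_of_length_le (by rw [List.length_drop]; omega)]
    rw [hwv]
    rw [pvWhileA_stop _ _ _ _ _ _ (by omega)]
    simp only [fA]
theorem clausesR_cons_of_mem (rest : List String) (hne : rest ≠ []) (hAND : "AND" ∈ rest) :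
    clausesR rest = rest.take (rest.idxOf "AND") :: clausesR (rest.drop (rest.idxOf "AND" + 1)) := by
  rw [clausesR]
  rw [dif_neg hne, if_pos hAND]

theorem pvWhileA_eq (sql_t1 nlu_t1 : List String) (wh1 : List Int) :
    ∀ (fuel : Nat) (st : Int) (acc : List (List Int)), 0 ≤ st → st ≤ (sql_t1.length : Int) →
      (sql_t1.length : Int) - st ≤ (fuel : Int) →
      pvWhileA sql_t1 nlu_t1 wh1 fuel st acc
        = acc ++ (clausesR (sql_t1.drop st.toNat)).map (fA nlu_t1 wh1) := by
  intro fuel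
  induction fuel with
  | zero =>
    intro st acc h0 hle hfuel
    have hst : st = (sql_t1.length : Int) := by omega
    have hdrop : sql_t1.drop st.toNat = [] := by
      apply List.drop_eq_nil_of_le
      omega
    rw [hdrop, clausesR_nil]
    simp [pvWhileA]
  | succ fuel ih =>
    intro st acc h0 hle hfuel
    by_cases hlt : st < (sql_t1.length : Int)
    · rw [pvWhileA_step sql_t1 nlu_t1 wh1 fuel st acc h0 hlt]
      have hrlen : (sql_t1.drop st.toNat).length = sql_t1.length - st.toNat := List.length_drop
      have hne : sql_t1.drop st.toNat ≠ [] := by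
        intro hc
        have := congrArg List.length hc
        simp [hrlen] at this
        omega
      by_cases hAND : "AND" ∈ sql_t1.drop st.toNat
      · rw [if_pos hAND]
        have hidxlt : (sql_t1.drop st.toNat).idxOf "AND" < (sql_t1.drop st.toNat).length :=
          List.idxOf_lt_length_of_mem hAND
        rw [ih _ _ (by omega) (by omega) (by omega)]
        rw [clausesR_cons_of_mem _ hne hAND]
        have hdrop2 : sql_t1.drop ((((sql_t1.drop st.toNat).idxOf "AND" : Nat) : Int) + st + 1).toNat
            = (sql_t1.drop st.toNat).drop ((sql_t1.drop st.toNat).idxOf "AND" + 1) := by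
          rw [List.drop_drop]
          congr 1
          omega
        rw [hdrop2]
        simp
      · rw [if_neg hAND]
        rw [clausesR_no_and _ hne hAND]
        simp
    · rw [pvWhileA_stop _ _ _ _ _ _ hlt]
      have hdrop : sql_t1.drop st.toNat = [] := by
        apply List.drop_eq_nil_of_le
        omega
      rw [hdrop, clausesR_nil]
      simp
theorem tokens_eq (sql_t1 : List String) :
    (if sql_t1.contains "WHERE" then PySem.List.slice sql_t1 (some ((((PySem.List.index? sql_t1 "WHERE").getD 0 : Nat) : Int) + 1)) none else [])
      = preTokens sql_t1 := by
  unfold preTokens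
  by_cases hW : "WHERE" ∈ sql_t1
  · rw [if_pos (List.elem_eq_true_of_mem hW), if_pos hW]
    rw [PySem.List.index?_eq_idxOf?, idxOf?_getD_of_mem hW]
    rw [show ((List.idxOf "WHERE" sql_t1 : Nat) : Int) + 1 = ((List.idxOf "WHERE" sql_t1 + 1 : Nat) : Int) by push_cast; ring]
    exact PySem.List.slice_from_natCast sql_t1 _
  · rw [if_neg (fun hc => hW (by simpa using hc)), if_neg hW]

theorem stdrop_eq (sql_t1 : List String) :
    sql_t1.drop (if sql_t1.contains "WHERE" then (((PySem.List.index? sql_t1 "WHERE").getD 0 : Nat) : Int) + 1 else (sql_t1.length : Int)).toNat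
      = preTokens sql_t1 := by
  unfold preTokens
  by_cases hW : "WHERE" ∈ sql_t1
  · rw [if_pos (List.elem_eq_true_of_mem hW), if_pos hW]
    rw [PySem.List.index?_eq_idxOf?, idxOf?_getD_of_mem hW,
        show ((List.idxOf "WHERE" sql_t1 : Nat) : Int) + 1 = ((List.idxOf "WHERE" sql_t1 + 1 : Nat) : Int) by push_cast; ring,
        Int.toNat_natCast]
  · rw [if_neg (fun hc => hW (by simpa using hc)), if_neg hW]
    rw [List.drop_eq_nil_of_le (by omega)]

theorem A_eq_map (nlu : List String) (nlu_t : List (List String)) (wh_to_wp_index : List (List Int)) (sql_i : List (List Int)) (sql_t : List (List String)) (tokenizer : List String) (nlu_wp_t : List (List String)) :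
    get_g_wvi_bert_from_sql_i nlu nlu_t wh_to_wp_index sql_i sql_t tokenizer nlu_wp_t
      = (List.range sql_i.length).map (fun b =>
          (clausesR (preTokens (sql_t.getD b []))).map
            (fA (nlu_t.getD b []) (wh_to_wp_index.getD b []))) := by
  unfold get_g_wvi_bert_from_sql_i
  rw [PySem.List.foldl_append_singleton_eq_map]
  rw [PySem.List.enumerate_eq_map_pyRange sql_i ([] : List Int), List.map_map]
  simp only [PySem.List.len_eq]
  rw [PySem.List.pyRange_zero_nat, List.map_map, List.nil_append]
  apply List.map_congr_left
  intro b _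
  simp only [Function.comp_apply]
  have hg1 : (PySem.List.pyGet? nlu_t ((b : Int))).getD [] = nlu_t.getD b [] := by
    simp [List.getD_eq_getElem?_getD]
  have hg2 : (PySem.List.pyGet? sql_t ((b : Int))).getD [] = sql_t.getD b [] := by
    simp [List.getD_eq_getElem?_getD]
  have hg3 : (PySem.List.pyGet? wh_to_wp_index ((b : Int))).getD [] = wh_to_wp_index.getD b [] := by
    simp [List.getD_eq_getElem?_getD]
  rw [hg1, hg2, hg3]
  set sql_t1 := sql_t.getD b [] with hs1
  have hst0 : (0 : Int) ≤ (if sql_t1.contains "WHERE" then (((PySem.List.index? sql_t1 "WHERE").getD 0 : Nat) : Int) + 1 else (sql_t1.length : Int)) := by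
    split <;> omega
  have hstle : (if sql_t1.contains "WHERE" then (((PySem.List.index? sql_t1 "WHERE").getD 0 : Nat) : Int) + 1 else (sql_t1.length : Int)) ≤ (sql_t1.length : Int) := by
    by_cases hW : "WHERE" ∈ sql_t1
    · rw [if_pos (List.elem_eq_true_of_mem hW)]
      rw [PySem.List.index?_eq_idxOf?, idxOf?_getD_of_mem hW]
      have := List.idxOf_lt_length_of_mem hW
      omega
    · rw [if_neg (fun hc => hW (by simpa using hc))]
  rw [pvWhileA_eq sql_t1 (nlu_t.getD b []) (wh_to_wp_index.getD b []) (sql_t1.length + 1) _ [] hst0 hstle (by push_cast; omega)]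
  rw [stdrop_eq sql_t1]
  simp

theorem alt_eq_map (nlu : List String) (nlu_t : List (List String)) (wh_to_wp_index : List (List Int)) (sql_i : List (List Int)) (sql_t : List (List String)) (tokenizer : List String) (nlu_wp_t : List (List String)) :
    get_g_wvi_bert_from_sql_i_alt nlu nlu_t wh_to_wp_index sql_i sql_t tokenizer nlu_wp_t
      = (List.range sql_i.length).map (fun b =>
          (clausesR (preTokens (sql_t.getD b []))).map
            (fB (nlu_t.getD b []) (wh_to_wp_index.getD b []))) := by
  unfold get_g_wvi_bert_from_sql_i_alt
  apply List.map_congr_left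
  intro b _
  show (pvSplitClauses _).map _ = _
  rw [tokens_eq (sql_t.getD b [])]
  rw [show pvSplitClauses (preTokens (sql_t.getD b [])) = preClauses (preTokens (sql_t.getD b [])) from rfl]
  rw [preClauses_eq_clausesR]
  rfl

-- ===== VERDICT (by name: the statement is the Claim_ definition above) =====
theorem get_g_wvi_bert_from_sql_i_spec : Claim_equal_get_g_wvi_bert_from_sql_i := by
  intro nlu nlu_t wh_to_wp_index sql_i sql_t tokenizer nlu_wp_t _hdom hpre
  unfold Spec_get_g_wvi_bert_from_sql_i
  rw [A_eq_map nlu nlu_t wh_to_wp_index sql_i sql_t tokenizer nlu_wp_t,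
      alt_eq_map nlu nlu_t wh_to_wp_index sql_i sql_t tokenizer nlu_wp_t]
  apply List.map_congr_left
  intro b hb
  apply List.map_congr_left
  intro clause hclause
  obtain ⟨_, _, _, _, _, hcl⟩ := hpre b hb
  rw [preClauses_eq_clausesR] at hcl
  obtain ⟨hop, hwv, hfst, _⟩ := hcl clause ((preClauses_eq_clausesR _) ▸ hclause)
  exact fA_eq_fB _ _ _ hop hwv hfst
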